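-- pv_equiv track=rewrite | github.com/babetsdasha/exmaple | Marathon /sprint1.py | kthTerm
-- ===== SOURCE A (Python) =====
-- def kthTerm(n, k):
--     c = []
--     power = 0
--     while len(c) <= k:
--         x = [(n**power + c[i]) for i in range(len(c))]
--         c.append(n**power)
--         c += x
--         power += 1
--     return c[k-1]
-- ===== SOURCE B (Python) =====
-- def kthTerm(n, k):
--     total = 0
--     p = 1
--     while k:
--         if k & 1:
--             total += p
--         p *= n
--         k >>= 1
--     return total
-- ===== Notes on version B (the rewrite author's own statement) =====
-- stated objective: faster
-- what changed: Instead of materialising the whole list of the first k 0/1-digit base-n numbers level by level, B reads the binary bits of k directly and sums n^i for each set bit i.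
-- intended difference: For k = 0 A returns 1 through Python's negative-index wraparound (c[0-1] = c[-1] is the last element built), while B returns 0, the empty bit-sum, which is the intended 0th term of the sequence. — e.g. on kthTerm(2, 0): A returns 1, B returns 0
import Mathlib
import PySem

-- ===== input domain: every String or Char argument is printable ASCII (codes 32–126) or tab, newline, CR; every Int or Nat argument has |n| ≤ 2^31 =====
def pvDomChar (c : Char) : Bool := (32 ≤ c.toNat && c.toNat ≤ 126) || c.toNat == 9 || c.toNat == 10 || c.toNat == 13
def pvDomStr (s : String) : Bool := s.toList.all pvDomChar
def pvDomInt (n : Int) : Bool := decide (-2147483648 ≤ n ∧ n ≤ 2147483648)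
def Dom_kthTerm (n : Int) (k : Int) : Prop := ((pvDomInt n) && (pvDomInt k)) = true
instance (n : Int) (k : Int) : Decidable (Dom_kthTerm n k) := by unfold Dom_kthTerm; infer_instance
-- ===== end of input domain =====

-- B replaces A's level-by-level construction of the whole list of 0/1-digit base-n numbers
-- by reading the binary bits of k and summing n^i for each set bit (objective: faster).
-- For k = 0 A's negative-index wraparound returns 1; B returns the intended 0 (see D_kthTerm).


-- ===== PORT A =====
-- the while loop body: x = [n**power + c[i] for i in range(len(c))]; c.append(n**power); c += x; power += 1
def kthTermLoop (n : Int) (k : Int) (c : List Int) (power : Nat) : List Int :=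
  if h : (c.length : Int) ≤ k then
    kthTermLoop n k (c ++ [n ^ power] ++ c.map (fun ci => n ^ power + ci)) (power + 1)
  else c
termination_by (k + 1 - c.length).toNat
decreasing_by simp only [List.length_append, List.length_map, List.length_cons]; omega

def kthTerm (n : Int) (k : Int) : Int :=
  -- c[k-1] with Python indexing (a negative index counts from the end);
  -- Pre_kthTerm excludes k < 0, the only case where this raises IndexError
  ((PySem.List.pyGet? (kthTermLoop n k [] 0) (k - 1)).getD 0)

-- ===== PORT B =====
-- while k: if k & 1: total += p; p *= n; k >>= 1   (k nonnegative on Pre_, recursed as a Nat)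
def kthTermAltLoop (n : Int) (k : Nat) (p total : Int) : Int :=
  if k = 0 then total
  else kthTermAltLoop n (k / 2) (p * n) (if k % 2 = 1 then total + p else total)

def kthTerm_alt (n : Int) (k : Int) : Int :=
  kthTermAltLoop n k.toNat 1 0

-- ===== PRECONDITION & SPEC =====
-- Pre_ excludes exactly k < 0, where A raises IndexError (the loop never runs, c stays empty).
def Pre_kthTerm (n : Int) (k : Int) : Prop := 0 ≤ k
instance (n : Int) (k : Int) : Decidable (Pre_kthTerm n k) := by unfold Pre_kthTerm; infer_instance
def pvWitness_kthTerm : Int × Int := (3, 5)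

-- For k = 0 A returns 1 through Python's negative-index wraparound (c[0-1] = c[-1], the last
-- element built), while B returns 0, the empty bit-sum, which is the intended 0th term.
def D_kthTerm (n : Int) (k : Int) : Prop := k = 0
instance (n : Int) (k : Int) : Decidable (D_kthTerm n k) := by unfold D_kthTerm; infer_instance

def Spec_kthTerm (n : Int) (k : Int) (out : Int) : Prop := ¬ D_kthTerm n k → out = kthTerm_alt n k
instance (n : Int) (k : Int) (out : Int) : Decidable (Spec_kthTerm n k out) := by unfold Spec_kthTerm; infer_instance

def pvDiffWitness_kthTerm : Int × Int := (2, 0)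
def pvDiffWitnessOut_kthTerm : Int × Int := (1, 0)

-- ===== CLAIM (what is proved, stated in full; the proofs are below) =====
def Claim_unchanged_kthTerm : Prop := ∀ (n : Int) (k : Int), Dom_kthTerm n k → Pre_kthTerm n k → Spec_kthTerm n k (kthTerm n k)
def Claim_changed_kthTerm : Prop := Dom_kthTerm (pvDiffWitness_kthTerm.1) (pvDiffWitness_kthTerm.2) ∧ Pre_kthTerm (pvDiffWitness_kthTerm.1) (pvDiffWitness_kthTerm.2) ∧ D_kthTerm (pvDiffWitness_kthTerm.1) (pvDiffWitness_kthTerm.2) ∧ kthTerm (pvDiffWitness_kthTerm.1) (pvDiffWitness_kthTerm.2) = pvDiffWitnessOut_kthTerm.1 ∧ kthTerm_alt (pvDiffWitness_kthTerm.1) (pvDiffWitness_kthTerm.2) = pvDiffWitnessOut_kthTerm.2 ∧ pvDiffWitnessOut_kthTerm.1 ≠ pvDiffWitnessOut_kthTerm.2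
def Claim_exact_kthTerm : Prop := ∀ (n : Int) (k : Int), Dom_kthTerm n k → Pre_kthTerm n k → D_kthTerm n k → kthTerm n k ≠ kthTerm_alt n k

-- ===== LEMMAS AND PROOFS =====

-- bitSum n m = Σ n^i over the set bits i of m: the m-th number whose base-n digits are all 0/1
def bitSum (n : Int) : Nat → Int
  | 0 => 0
  | m + 1 => (if (m + 1) % 2 = 1 then 1 else 0) + n * bitSum n ((m + 1) / 2)

theorem bitSum_step (n : Int) (m : Nat) :
    bitSum n m = (if m % 2 = 1 then 1 else 0) + n * bitSum n (m / 2) := by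
  cases m with
  | zero => simp [bitSum]
  | succ m => rw [bitSum]

theorem bitSum_pow_add (n : Int) (p : Nat) :
    ∀ m < 2 ^ p, bitSum n (2 ^ p + m) = n ^ p + bitSum n m := by
  induction p with
  | zero =>
    intro m hm
    interval_cases m
    rw [bitSum_step]
    norm_num [bitSum]
  | succ p ih =>
    intro m hm
    have h1 : (2 ^ (p + 1) + m) % 2 = m % 2 := by omega
    have h2 : (2 ^ (p + 1) + m) / 2 = 2 ^ p + m / 2 := by omega
    rw [bitSum_step n (2 ^ (p + 1) + m), h1, h2, ih (m / 2) (by omega), bitSum_step n m,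
      pow_succ]
    ring

theorem kthTermAltLoop_eq (n : Int) : ∀ (k : Nat) (p total : Int),
    kthTermAltLoop n k p total = total + p * bitSum n k := by
  intro k
  induction k using Nat.strong_induction_on with
  | _ k ih =>
    intro p total
    rw [kthTermAltLoop]
    by_cases hk : k = 0
    · simp [hk, bitSum]
    · simp only [hk, if_false]
      rw [ih (k / 2) (Nat.div_lt_self (by omega) (by omega)), bitSum_step n k]
      split_ifs <;> ring

theorem kthTermLoop_inv (n k : Int) : ∀ (cs : List Int) (power : Nat),
    cs.length = 2 ^ power - 1 →
    (∀ j (h : j < cs.length), cs[j]'h = bitSum n (j + 1)) →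
    k < ((kthTermLoop n k cs power).length : Int) ∧
    (∀ j (h : j < (kthTermLoop n k cs power).length),
      (kthTermLoop n k cs power)[j]'h = bitSum n (j + 1)) := by
  intro cs power
  induction cs, power using kthTermLoop.induct n k with
  | case1 cs power h ih =>
    intro hlen hget
    have hp : 0 < 2 ^ power := Nat.two_pow_pos power
    rw [kthTermLoop, dif_pos h]
    simp only [List.map_subtype, List.unattach_attach] at ih
    refine ih ?_ ?_
    · simp only [List.length_append, List.length_map, List.length_cons, List.length_nil,
        pow_succ]
      omega
    · intro j hj
      simp only [List.length_append, List.length_map, List.length_cons, List.length_nil] at hj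
      by_cases h1 : j < cs.length
      · rw [List.getElem_append_left (by simp; omega), List.getElem_append_left h1]
        exact hget j h1
      · have hpow : bitSum n (2 ^ power) = n ^ power := by
          have := bitSum_pow_add n power 0 hp
          simpa [bitSum] using this
        by_cases h2 : j = cs.length
        · subst h2
          rw [List.getElem_append_left (by simp),
            List.getElem_append_right (Nat.le_refl _)]
          simp only [Nat.sub_self, List.getElem_cons_zero]
          rw [hpow.symm]
          congr 1
          omega
        · have h3 : (cs ++ [n ^ power]).length ≤ j := by simp; omega
          rw [List.getElem_append_right h3]
          have h4 : j - (cs ++ [n ^ power]).length < cs.length := by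
            simp only [List.length_append, List.length_cons, List.length_nil]
            omega
          rw [List.getElem_map]
          rw [hget _ (by simpa using h4)]
          have h5 : j + 1 = 2 ^ power + (j - (cs ++ [n ^ power]).length + 1) := by
            simp only [List.length_append, List.length_cons, List.length_nil]
            omega
          rw [h5, bitSum_pow_add n power _ (by
            simp only [List.length_append, List.length_cons, List.length_nil]
            omega)]
  | case2 cs power h =>
    intro hlen hget
    rw [kthTermLoop, dif_neg h]
    exact ⟨by omega, hget⟩

theorem kthTerm_spec : Claim_unchanged_kthTerm := by
  intro n k _ hpre hD
  have hk : 1 ≤ k := by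
    unfold Pre_kthTerm at hpre; unfold D_kthTerm at hD; omega
  obtain ⟨hlt, hget⟩ := kthTermLoop_inv n k [] 0 (by simp) (by intro j hj; simp at hj)
  set R := kthTermLoop n k [] 0 with hR
  unfold kthTerm
  have hidx : (k - 1).toNat < R.length := by omega
  rw [PySem.List.pyGet?_of_nonneg _ (by omega), List.getElem?_eq_getElem hidx]
  simp only [Option.getD_some]
  rw [hget _ hidx]
  have h6 : (k - 1).toNat + 1 = k.toNat := by omega
  rw [h6, kthTerm_alt, kthTermAltLoop_eq]
  ring

theorem kthTerm_changed : Claim_changed_kthTerm := by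
  unfold Claim_changed_kthTerm
  refine ⟨by decide, by decide, by decide, ?_, ?_, by decide⟩
  · show kthTerm 2 0 = 1
    have h1 : kthTermLoop 2 0 [] 0 = kthTermLoop 2 0 [1] 1 := by
      rw [kthTermLoop]; norm_num
    have h2 : kthTermLoop 2 0 [1] 1 = [1] := by
      rw [kthTermLoop]; norm_num
    unfold kthTerm
    rw [h1, h2]
    simp [PySem.List.pyGet?_neg_one]
  · show kthTerm_alt 2 0 = 0
    rw [kthTerm_alt, kthTermAltLoop]
    norm_num

theorem kthTerm_tight : Claim_exact_kthTerm := by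
  intro n k _ _ hD
  unfold D_kthTerm at hD
  subst hD
  have h1 : kthTermLoop n 0 [] 0 = kthTermLoop n 0 [1] 1 := by
    rw [kthTermLoop]; norm_num
  have h2 : kthTermLoop n 0 [1] 1 = [1] := by
    rw [kthTermLoop]; norm_num
  unfold kthTerm kthTerm_alt
  rw [h1, h2, kthTermAltLoop]
  norm_num [PySem.List.pyGet?_neg_one]
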